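-- pv_equiv track=rewrite | github.com/PavelPatsey/tinkoff_contest | 1_variant/task_4/task_4_var_Fedor.py | f
-- ===== SOURCE A (Python) =====
-- def f(k, a):
--     "списки для каждого разряда"
--     d = {i: [] for i in range(10)}
--     """Заполним эти списки:
--         для каждого числа
--         разберем его на цифры
--         каждую цифру сложим в соответствующий список"""
--     for x in a:
--         j = 0
--         while x > 0:
--             d[j].append(x % 10)
--             j += 1
--             x //= 10
--     "начиная со старшего разряда"
--     j = 9
--     s = 0
--     "пока еще есть разряды и хватает замен"
--     while j >= 0 and k > 0:
--         "отсортируем разряд"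
--         t = sorted(d[j])
--         i = 0
--         "пока хватает замен и есть цифры в разряде"
--         while k > 0 and i < len(t):
--             "заменим цифру на 9, если это не 9, добавим в сумму"
--             if t[i] != 9:
--                 s += (9 - t[i]) * 10**j
--                 k -= 1
--             i += 1
--         j -= 1
--     return s
-- ===== SOURCE B (Python) =====
-- def f(k, a):
--     # One flat pass: collect the gain of turning each digit into a 9,
--     # then pick the k largest gains globally.
--     gains = []
--     for x in a:
--         pos = 0
--         while x > 0:
--             digit = x % 10
--             if digit != 9:
--                 gains.append((9 - digit) * 10 ** pos)
--             pos += 1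
--             x //= 10
--     gains.sort(reverse=True)
--     return sum(gains[:max(k, 0)])
-- ===== Notes on version B (the rewrite author's own statement) =====
-- stated objective: simpler
-- what changed: Replaces the per-position dict of digit lists and the position-by-position greedy (outer loop over positions 9..0, inner loop over the sorted digits of each position) with a single flat list of all digit gains (9-digit)*10**pos, sorted once descending, summing the top max(k,0) gains; correct because any gain at a higher position strictly exceeds any gain at a lower position.
import Mathlib
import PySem

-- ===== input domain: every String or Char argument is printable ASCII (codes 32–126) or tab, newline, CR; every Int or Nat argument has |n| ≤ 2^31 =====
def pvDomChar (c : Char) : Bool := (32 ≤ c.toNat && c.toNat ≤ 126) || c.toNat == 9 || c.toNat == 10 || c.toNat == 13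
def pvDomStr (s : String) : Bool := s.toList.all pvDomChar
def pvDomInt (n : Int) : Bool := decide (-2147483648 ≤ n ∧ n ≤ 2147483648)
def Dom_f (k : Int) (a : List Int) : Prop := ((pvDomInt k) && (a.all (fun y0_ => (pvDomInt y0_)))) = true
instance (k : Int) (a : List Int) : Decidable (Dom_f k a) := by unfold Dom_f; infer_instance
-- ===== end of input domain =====

-- B replaces A's per-position dict + position-by-position greedy with one flat
-- list of all digit gains, sorted once descending, summing the top max(k,0). (objective: simpler)

-- termination helper for the digit-extraction recursions (x //= 10 shrinks x)
theorem pvDiv10_toNat_lt (x : Int) (h : 0 < x) : (PySem.Int.floordiv x 10).toNat < x.toNat := by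
  rw [PySem.Int.floordiv_eq_ediv_of_pos (by norm_num)]
  have h1 := Int.ediv_add_emod x 10
  have h2 := Int.emod_nonneg x (by norm_num : (10:Int) ≠ 0)
  have h3 := Int.emod_lt_of_pos x (by norm_num : (0:Int) < 10)
  omega

-- ===== PORT A =====
-- inner 'while x > 0' loop: d[j].append(x % 10); j += 1; x //= 10
-- (d[j] is ported as modify with default []: on the admitted domain |x| ≤ 2^31 the key j ≤ 9 is always present, exact there)
def fFill (x : Int) (j : Int) (d : PySem.Dict Int (List Int)) : PySem.Dict Int (List Int) :=
  if h : 0 < x then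
    fFill (PySem.Int.floordiv x 10) (j + 1) (d.modify j [] (fun l => l ++ [PySem.Int.mod x 10]))
  else d
  termination_by x.toNat
  decreasing_by exact pvDiv10_toNat_lt x h

-- inner 'while k > 0 and i < len(t)' loop, iterated over the remaining suffix of t; returns (k, s)
def fInner (t : List Int) (j : Int) (k : Int) (s : Int) : Int × Int :=
  match t with
  | [] => (k, s)
  | ti :: rest =>
    if k > 0 then
      if ti ≠ 9 then fInner rest j (k - 1) (s + (9 - ti) * 10 ^ j.toNat)
      else fInner rest j k s
    else (k, s)

-- outer 'while j >= 0 and k > 0' loop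
def fOuter (d : PySem.Dict Int (List Int)) (j : Int) (k : Int) (s : Int) : Int :=
  if h : j ≥ 0 ∧ k > 0 then
    let t := PySem.List.sorted (d.getD j []) (fun x => x) false
    let p := fInner t j k s
    fOuter d (j - 1) p.1 p.2
  else s
  termination_by (j + 1).toNat
  decreasing_by omega

def f (k : Int) (a : List Int) : Int :=
  let d : PySem.Dict Int (List Int) :=
    (PySem.List.pyRange 0 10 1).foldl (fun d i => d.insert i []) PySem.Dict.empty
  let d := a.foldl (fun d x => fFill x 0 d) d
  fOuter d 9 k 0

-- ===== PORT B =====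
-- 'while x > 0' loop: if digit != 9: gains.append((9 - digit) * 10 ** pos)
def fAltGains (x : Int) (pos : Int) : List Int :=
  if h : 0 < x then
    (if PySem.Int.mod x 10 ≠ 9 then [(9 - PySem.Int.mod x 10) * 10 ^ pos.toNat] else []) ++
      fAltGains (PySem.Int.floordiv x 10) (pos + 1)
  else []
  termination_by x.toNat
  decreasing_by exact pvDiv10_toNat_lt x h

def f_alt (k : Int) (a : List Int) : Int :=
  let gains := a.foldl (fun g x => g ++ fAltGains x 0) []
  let gains := PySem.List.sorted gains (fun x => x) true
  (PySem.List.slice gains none (some (max k 0))).sum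

-- ===== PRECONDITION & SPEC =====
def Spec_f (k : Int) (a : List Int) (out : Int) : Prop := out = f_alt k a
instance (k : Int) (a : List Int) (out : Int) : Decidable (Spec_f k a out) := by unfold Spec_f; infer_instance

-- ===== CLAIM (what is proved, stated in full; the proofs are below) =====
def Claim_equal_f : Prop := ∀ (k : Int) (a : List Int), Dom_f k a → Spec_f k a (f k a)

-- ===== LEMMAS AND PROOFS =====

-- digits of x contributed to column m, when the digit counter starts at j
def digAt (x : Int) (j : Int) (m : Int) : List Int :=
  if h : 0 < x then
    (if j = m then [PySem.Int.mod x 10] else []) ++ digAt (PySem.Int.floordiv x 10) (j + 1) m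
  else []
  termination_by x.toNat
  decreasing_by exact pvDiv10_toNat_lt x h

theorem digAt_pos (x j m : Int) (h : 0 < x) :
    digAt x j m = (if j = m then [PySem.Int.mod x 10] else []) ++
      digAt (PySem.Int.floordiv x 10) (j + 1) m := by
  rw [digAt]; simp [h]

theorem digAt_nonpos (x j m : Int) (h : ¬ 0 < x) : digAt x j m = [] := by
  rw [digAt]; simp [h]

theorem fAltGains_pos (x p : Int) (h : 0 < x) :
    fAltGains x p = (if PySem.Int.mod x 10 ≠ 9 then [(9 - PySem.Int.mod x 10) * 10 ^ p.toNat] else []) ++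
      fAltGains (PySem.Int.floordiv x 10) (p + 1) := by
  rw [fAltGains]; simp [h]

theorem fAltGains_nonpos (x p : Int) (h : ¬ 0 < x) : fAltGains x p = [] := by
  rw [fAltGains]; simp [h]

-- the greedy 'take up to k gains front to back' fold both loops reduce to
def gTake (L : List Int) (k : Int) : Int × Int :=
  match L with
  | [] => (k, 0)
  | g :: rest => if k > 0 then ((gTake rest (k - 1)).1, g + (gTake rest (k - 1)).2) else (k, 0)

def blockG (d : PySem.Dict Int (List Int)) (j : Int) : List Int :=
  ((PySem.List.sorted (d.getD j []) (fun x => x) false).filter (fun dg => dg ≠ 9)).map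
    (fun dg => (9 - dg) * 10 ^ j.toNat)

def laFrom (d : PySem.Dict Int (List Int)) (j : Int) : List Int :=
  if h : 0 ≤ j then blockG d j ++ laFrom d (j - 1) else []
  termination_by (j + 1).toNat
  decreasing_by omega

theorem gTake_nonpos (L : List Int) (k : Int) (h : ¬ k > 0) : gTake L k = (k, 0) := by
  cases L with
  | nil => rfl
  | cons g rest => simp [gTake, h]

theorem gTake_append (L1 L2 : List Int) (k : Int) :
    gTake (L1 ++ L2) k = ((gTake L2 (gTake L1 k).1).1, (gTake L1 k).2 + (gTake L2 (gTake L1 k).1).2) := by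
  induction L1 generalizing k with
  | nil => simp [gTake]
  | cons g rest ih =>
    by_cases hk : k > 0
    · simp only [List.cons_append, gTake, if_pos hk, ih (k - 1)]
      ring_nf
    · simp only [List.cons_append, gTake, if_neg hk]
      rw [gTake_nonpos L2 k hk]
      simp

theorem gTake_sum_take (L : List Int) (k : Int) :
    (gTake L k).2 = (L.take (max k 0).toNat).sum := by
  induction L generalizing k with
  | nil => simp [gTake]
  | cons g rest ih =>
    by_cases hk : k > 0
    · have : (max k 0).toNat = ((max (k-1) 0).toNat) + 1 := by omega
      simp [gTake, if_pos hk, this, ih (k - 1)]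
    · rw [gTake_nonpos _ _ hk]
      have : (max k 0).toNat = 0 := by omega
      simp [this]

theorem fInner_eq (t : List Int) (j : Int) (k s : Int) :
    fInner t j k s =
      ((gTake ((t.filter (fun dg => dg ≠ 9)).map (fun dg => (9 - dg) * 10 ^ j.toNat)) k).1,
       s + (gTake ((t.filter (fun dg => dg ≠ 9)).map (fun dg => (9 - dg) * 10 ^ j.toNat)) k).2) := by
  induction t generalizing k s with
  | nil => simp [fInner, gTake]
  | cons ti rest ih =>
    by_cases hk : k > 0
    · by_cases h9 : ti = 9
      · simp [fInner, hk, h9, ih]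
      · have hfil : (ti :: rest).filter (fun dg => decide (dg ≠ 9)) =
            ti :: rest.filter (fun dg => decide (dg ≠ 9)) := by
          simp [List.filter_cons, h9]
        rw [fInner, if_pos hk, if_pos h9, ih]
        simp only [hfil, List.map_cons, gTake, if_pos hk]
        rw [Prod.mk.injEq]
        exact ⟨rfl, by ring⟩
    · simp only [fInner, if_neg hk]
      rw [gTake_nonpos _ _ hk]
      simp

theorem laFrom_neg (d : PySem.Dict Int (List Int)) (j : Int) (h : j < 0) : laFrom d j = [] := by
  rw [laFrom]; simp [not_le.mpr h]

theorem laFrom_nonneg (d : PySem.Dict Int (List Int)) (j : Int) (h : 0 ≤ j) :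
    laFrom d j = blockG d j ++ laFrom d (j - 1) := by
  rw [laFrom]; simp [h]

theorem fOuter_eq_fuel (n : Nat) : ∀ (d : PySem.Dict Int (List Int)) (j k s : Int),
    (j + 1).toNat ≤ n → fOuter d j k s = s + (gTake (laFrom d j) k).2 := by
  induction n with
  | zero =>
    intro d j k s hn
    have hj : j < 0 := by omega
    rw [fOuter]
    simp only [dif_neg (by omega : ¬ (j ≥ 0 ∧ k > 0))]
    rw [laFrom_neg d j hj]
    simp [gTake]
  | succ n ih =>
    intro d j k s hn
    by_cases h : j ≥ 0 ∧ k > 0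
    · rw [fOuter]
      simp only [dif_pos h]
      rw [ih d (j - 1) _ _ (by omega)]
      rw [fInner_eq, laFrom_nonneg d j h.1, gTake_append]
      have hbg : (((PySem.List.sorted (d.getD j []) (fun x => x) false).filter
          (fun dg => dg ≠ 9)).map (fun dg => (9 - dg) * 10 ^ j.toNat)) = blockG d j := rfl
      rw [hbg]
      ring
    · rw [fOuter]
      simp only [dif_neg h]
      by_cases hk : k > 0
      · have hj : j < 0 := by
          rcases not_and_or.mp h with hj | hk' <;> omega
        rw [laFrom_neg d j hj]
        simp [gTake]
      · rw [gTake_nonpos _ _ hk]; simp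

theorem fOuter_eq (d : PySem.Dict Int (List Int)) (j k s : Int) :
    fOuter d j k s = s + (gTake (laFrom d j) k).2 :=
  fOuter_eq_fuel (j + 1).toNat d j k s le_rfl

-- ---- characterisation of the filled dict ----

theorem getD_fFill (x : Int) (j : Int) (d : PySem.Dict Int (List Int)) (m : Int) :
    (fFill x j d).getD m [] = d.getD m [] ++ digAt x j m := by
  induction x, j, d using fFill.induct with
  | case1 x j d h ih =>
    rw [fFill, dif_pos h, ih, digAt_pos x j m h]
    rw [PySem.Dict.getD_modify]
    by_cases hm : m = j
    · subst hm; simp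
    · have hjm : ¬ j = m := fun hh => hm hh.symm
      simp [hm, hjm]
  | case2 x j d h =>
    rw [fFill, dif_neg h, digAt_nonpos x j m h]
    simp

theorem getD_fold_fFill (a : List Int) (d : PySem.Dict Int (List Int)) (m : Int) :
    (a.foldl (fun d x => fFill x 0 d) d).getD m [] =
      d.getD m [] ++ a.flatMap (fun x => digAt x 0 m) := by
  induction a generalizing d with
  | nil => simp
  | cons x rest ih =>
    simp only [List.foldl_cons, List.flatMap_cons]
    rw [ih, getD_fFill, List.append_assoc]

theorem getD_init (l : List Int) (d : PySem.Dict Int (List Int)) (m : Int)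
    (h : d.getD m [] = []) :
    (l.foldl (fun d i => d.insert i []) d).getD m [] = [] := by
  induction l generalizing d with
  | nil => exact h
  | cons i rest ih =>
    simp only [List.foldl_cons]
    refine ih _ ?_
    rw [PySem.Dict.getD_insert]
    split <;> simp [h]

-- the filled dict of f, and its columns
def colD (a : List Int) (m : Int) : List Int := a.flatMap (fun x => digAt x 0 m)

theorem getD_dF (a : List Int) (m : Int) :
    ((a.foldl (fun d x => fFill x 0 d)
        ((PySem.List.pyRange 0 10 1).foldl (fun d i => d.insert i []) PySem.Dict.empty)).getD m []) =
      colD a m := by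
  rw [getD_fold_fFill, getD_init _ _ _ (by simp [PySem.Dict.getD_empty])]
  rfl

-- ---- digit bounds ----

theorem digAt_bounds_fuel (n : Nat) : ∀ (x j m : Int), x.toNat ≤ n →
    ∀ dg ∈ digAt x j m, 0 ≤ dg ∧ dg < 10 := by
  induction n with
  | zero =>
    intro x j m hx dg hdg
    rw [digAt_nonpos x j m (by omega)] at hdg
    simp at hdg
  | succ n ih =>
    intro x j m hx dg hdg
    by_cases h : 0 < x
    · rw [digAt_pos x j m h] at hdg
      rcases List.mem_append.mp hdg with h1 | h2
      · have : dg = PySem.Int.mod x 10 := by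
          by_cases hjm : j = m
          · simpa [hjm] using h1
          · simp [hjm] at h1
        subst this
        exact ⟨PySem.Int.mod_nonneg x (by norm_num), PySem.Int.mod_lt x (by norm_num)⟩
      · exact ih _ _ _ (by have := pvDiv10_toNat_lt x h; omega) dg h2
    · rw [digAt_nonpos x j m h] at hdg
      simp at hdg

theorem digAt_bounds (x : Int) (j m : Int) : ∀ dg ∈ digAt x j m, 0 ≤ dg ∧ dg < 10 :=
  digAt_bounds_fuel x.toNat x j m le_rfl

-- ---- sortedness of laFrom ----

theorem blockG_pairwise (d : PySem.Dict Int (List Int)) (j : Int) :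
    (blockG d j).Pairwise (fun g g' => g' ≤ g) := by
  unfold blockG
  rw [List.pairwise_map]
  refine List.Pairwise.filter _ ?_
  refine (PySem.List.sorted_pairwise (d.getD j []) (fun x => x) ).imp ?_
  intro a b hab
  have hpow : (0:Int) ≤ 10 ^ j.toNat := by positivity
  nlinarith

theorem blockG_mem_bounds (a : List Int) (d : PySem.Dict Int (List Int)) (j : Int)
    (hcol : d.getD j [] = colD a j) :
    ∀ g ∈ blockG d j, 10 ^ j.toNat ≤ g ∧ g ≤ 9 * 10 ^ j.toNat := by
  intro g hg
  unfold blockG at hg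
  rcases List.mem_map.mp hg with ⟨dg, hdgmem, rfl⟩
  have h9 : dg ≠ 9 := by simpa using (List.mem_filter.mp hdgmem).2
  have hmem : dg ∈ PySem.List.sorted (d.getD j []) (fun x => x) false := (List.mem_filter.mp hdgmem).1
  have hmem2 : dg ∈ d.getD j [] := (PySem.List.mem_sorted _ _ _ _).mp hmem
  rw [hcol] at hmem2
  rcases List.mem_flatMap.mp hmem2 with ⟨x, _, hx⟩
  have hb := digAt_bounds x 0 j dg hx
  have h8 : dg ≤ 8 := by omega
  have hpow : (0:Int) < 10 ^ j.toNat := by positivity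
  constructor <;> nlinarith [hb.1, h8]

theorem cross_blocks (a : List Int) (d : PySem.Dict Int (List Int)) (j j' : Int)
    (hcol : ∀ m, d.getD m [] = colD a m) (h0 : 0 ≤ j') (hlt : j' < j) :
    ∀ g ∈ blockG d j, ∀ g' ∈ blockG d j', g' ≤ g := by
  intro g hg g' hg'
  have h1 := blockG_mem_bounds a d j (hcol j) g hg
  have h2 := blockG_mem_bounds a d j' (hcol j') g' hg'
  have hj : j'.toNat < j.toNat := by omega
  have : (9:Int) * 10 ^ j'.toNat < 10 ^ j.toNat := by
    calc (9:Int) * 10 ^ j'.toNat < 10 * 10 ^ j'.toNat := by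
          have : (0:Int) < 10 ^ j'.toNat := by positivity
          nlinarith
    _ = 10 ^ (j'.toNat + 1) := by ring
    _ ≤ 10 ^ j.toNat := by
          apply pow_le_pow_right₀ (by norm_num)
          omega
  linarith [h1.1, h2.2]

def descJ : List Int := [9, 8, 7, 6, 5, 4, 3, 2, 1, 0]

theorem laFrom_nine (d : PySem.Dict Int (List Int)) :
    laFrom d 9 = descJ.flatMap (blockG d) := by
  rw [laFrom_nonneg d 9 (by norm_num)]; norm_num
  rw [laFrom_nonneg d 8 (by norm_num)]; norm_num
  rw [laFrom_nonneg d 7 (by norm_num)]; norm_num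
  rw [laFrom_nonneg d 6 (by norm_num)]; norm_num
  rw [laFrom_nonneg d 5 (by norm_num)]; norm_num
  rw [laFrom_nonneg d 4 (by norm_num)]; norm_num
  rw [laFrom_nonneg d 3 (by norm_num)]; norm_num
  rw [laFrom_nonneg d 2 (by norm_num)]; norm_num
  rw [laFrom_nonneg d 1 (by norm_num)]; norm_num
  rw [laFrom_nonneg d 0 (by norm_num)]; norm_num
  rw [laFrom_neg d (-1) (by norm_num)]
  simp [descJ]

theorem laFrom_sorted (a : List Int) (d : PySem.Dict Int (List Int))
    (hcol : ∀ m, d.getD m [] = colD a m) :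
    (laFrom d 9).Pairwise (fun g g' => g' ≤ g) := by
  rw [laFrom_nine]
  rw [List.flatMap_def, List.pairwise_flatten]
  constructor
  · intro l hl
    rcases List.mem_map.mp hl with ⟨j, _, rfl⟩
    exact blockG_pairwise d j
  · rw [List.pairwise_map]
    have hP : descJ.Pairwise (fun j j' => 0 ≤ j' ∧ j' < j) := by decide
    exact hP.imp (fun hab => by
      intro g hg g' hg'
      exact cross_blocks a d _ _ hcol hab.1 hab.2 g hg g' hg')

-- ---- permutation: laFrom d 9 ~ flat gains list ----

theorem flatMap_ite_single (l : List Int) (p : Int) (hd : List Int)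
    (hmem : p ∈ l) (hnd : l.Nodup) :
    l.flatMap (fun j => if p = j then hd else []) = hd := by
  induction l with
  | nil => simp at hmem
  | cons x rest ih =>
    rw [List.flatMap_cons]
    rcases List.mem_cons.mp hmem with rfl | hm
    · have hall : ∀ j ∈ rest, (if p = j then hd else ([] : List Int)) = [] := by
        intro j hj
        have hpj : p ≠ j := by rintro rfl; exact (List.nodup_cons.mp hnd).1 hj
        simp [hpj]
      simp [List.flatMap_eq_nil_iff.mpr hall]
    · have hne : p ≠ x := by
        intro hh; subst hh; exact (List.nodup_cons.mp hnd).1 hm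
      simp [hne, ih hm (List.nodup_cons.mp hnd).2]

theorem map_filter_flatMap (a : List Int) (h : Int → List Int) (p : Int → Bool) (g : Int → Int) :
    ((a.flatMap h).filter p).map g = a.flatMap (fun x => ((h x).filter p).map g) := by
  induction a with
  | nil => rfl
  | cons y rest ih => simp [List.flatMap_cons, List.filter_append, ih]

theorem coe_flatMap_append (l : List Int) (A B : Int → List Int) :
    (↑(l.flatMap fun j => A j ++ B j) : Multiset Int) = ↑(l.flatMap A) + ↑(l.flatMap B) := by
  induction l with
  | nil => simp
  | cons x rest ih =>
    simp only [List.flatMap_cons, ← Multiset.coe_add, ih]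
    push_cast
    abel

theorem perX_fuel (n : Nat) : ∀ (x p : Int), x.toNat ≤ n → 0 ≤ p → p ≤ 10 →
    x < 10 ^ (10 - p.toNat) →
    (↑(descJ.flatMap (fun j => ((digAt x p j).filter (fun dg => dg ≠ 9)).map
        (fun dg => (9 - dg) * 10 ^ j.toNat))) : Multiset Int) = ↑(fAltGains x p) := by
  induction n with
  | zero =>
    intro x p hn h0 h10 hx
    have hxle : ¬ 0 < x := by omega
    rw [fAltGains_nonpos x p hxle]
    have : ∀ j ∈ descJ, ((digAt x p j).filter (fun dg => dg ≠ 9)).map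
        (fun dg => (9 - dg) * 10 ^ j.toNat) = [] := by
      intro j _
      rw [digAt_nonpos x p j hxle]
      rfl
    rw [List.flatMap_eq_nil_iff.mpr this]
  | succ n ih =>
    intro x p hn h0 h10 hx
    by_cases hxpos : 0 < x
    · -- head digit at position p, tail digits from x // 10 at positions > p
      have hp9 : p ≤ 9 := by
        by_contra hc
        have hp10 : p = 10 := by omega
        rw [hp10] at hx
        norm_num at hx
        omega
      have hx10 : PySem.Int.floordiv x 10 < 10 ^ (10 - (p + 1).toNat) := by
        have h1 : (10 - (p + 1).toNat) = (10 - p.toNat) - 1 := by omega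
        rw [h1, PySem.Int.floordiv_lt_iff_lt_mul (by norm_num)]
        calc x < 10 ^ (10 - p.toNat) := hx
        _ = 10 ^ ((10 - p.toNat - 1) + 1) := by congr 1; omega
        _ = 10 ^ (10 - p.toNat - 1) * 10 := by rw [pow_succ]
      have hsplit : ∀ j, ((digAt x p j).filter (fun dg => dg ≠ 9)).map
            (fun dg => (9 - dg) * 10 ^ j.toNat) =
          (if p = j then (([PySem.Int.mod x 10].filter (fun dg => dg ≠ 9)).map
            (fun dg => (9 - dg) * 10 ^ p.toNat)) else []) ++
          ((digAt (PySem.Int.floordiv x 10) (p + 1) j).filter (fun dg => dg ≠ 9)).map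
            (fun dg => (9 - dg) * 10 ^ j.toNat) := by
        intro j
        rw [digAt_pos x p j hxpos, List.filter_append, List.map_append]
        congr 1
        by_cases hpj : p = j
        · subst hpj; simp
        · simp [hpj]
      have hrw : descJ.flatMap (fun j => ((digAt x p j).filter (fun dg => dg ≠ 9)).map
            (fun dg => (9 - dg) * 10 ^ j.toNat)) =
          descJ.flatMap (fun j =>
            (if p = j then (([PySem.Int.mod x 10].filter (fun dg => dg ≠ 9)).map
              (fun dg => (9 - dg) * 10 ^ p.toNat)) else []) ++
            ((digAt (PySem.Int.floordiv x 10) (p + 1) j).filter (fun dg => dg ≠ 9)).map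
              (fun dg => (9 - dg) * 10 ^ j.toNat)) :=
        List.flatMap_congr (fun j _ => hsplit j)
      rw [hrw, coe_flatMap_append]
      rw [flatMap_ite_single descJ p _ (by simp [descJ]; omega) (by decide)]
      rw [ih (PySem.Int.floordiv x 10) (p + 1)
        (by have := pvDiv10_toNat_lt x hxpos; omega) (by omega) (by omega) hx10]
      rw [fAltGains_pos x p hxpos]
      by_cases h9 : PySem.Int.mod x 10 = 9
      · rw [h9]
        simp
      · rw [if_pos h9]
        have h9' : ¬ x % 10 = 9 := by
          rw [← PySem.Int.mod_eq_emod_of_pos (b := 10) (by norm_num)]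
          exact h9
        have hfil : [PySem.Int.mod x 10].filter (fun dg => decide (dg ≠ 9)) =
            [PySem.Int.mod x 10] := by
          rw [List.filter_singleton]
          simp [h9']
        rw [hfil]
        simp
    · rw [fAltGains_nonpos x p hxpos]
      have : ∀ j ∈ descJ, ((digAt x p j).filter (fun dg => dg ≠ 9)).map
          (fun dg => (9 - dg) * 10 ^ j.toNat) = [] := by
        intro j _
        rw [digAt_nonpos x p j hxpos]
        rfl
      rw [List.flatMap_eq_nil_iff.mpr this]

theorem perX (x : Int) (p : Int) (h0 : 0 ≤ p) (h10 : p ≤ 10)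
    (hx : x < 10 ^ (10 - p.toNat)) :
    (↑(descJ.flatMap (fun j => ((digAt x p j).filter (fun dg => dg ≠ 9)).map
        (fun dg => (9 - dg) * 10 ^ j.toNat))) : Multiset Int) = ↑(fAltGains x p) :=
  perX_fuel x.toNat x p le_rfl h0 h10 hx

theorem la_perm_gains (a : List Int) (d : PySem.Dict Int (List Int))
    (hcol : ∀ m, d.getD m [] = colD a m)
    (hdom : ∀ x ∈ a, x < 10 ^ 10) :
    (laFrom d 9).Perm (a.flatMap (fun x => fAltGains x 0)) := by
  rw [← Multiset.coe_eq_coe, laFrom_nine]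
  have hblock : ∀ j, (↑(blockG d j) : Multiset Int) =
      ↑(((colD a j).filter (fun dg => dg ≠ 9)).map (fun dg => (9 - dg) * 10 ^ j.toNat)) := by
    intro j
    rw [Multiset.coe_eq_coe]
    unfold blockG
    rw [hcol j]
    exact (((PySem.List.sorted_perm (colD a j) (fun x => x) false).filter _).map _)
  calc (↑(descJ.flatMap (blockG d)) : Multiset Int)
      = (↑descJ : Multiset Int).bind (fun j => ↑(blockG d j)) := (Multiset.coe_bind _ _).symm
    _ = (↑descJ : Multiset Int).bind (fun j =>
          ↑(a.flatMap (fun x => ((digAt x 0 j).filter (fun dg => dg ≠ 9)).map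
            (fun dg => (9 - dg) * 10 ^ j.toNat)))) := by
        refine Multiset.bind_congr (fun j _ => ?_)
        rw [hblock j]
        exact congrArg (fun l : List Int => (↑l : Multiset Int))
          (by unfold colD; rw [map_filter_flatMap])
    _ = (↑descJ : Multiset Int).bind (fun j => (↑a : Multiset Int).bind
          (fun x => ↑(((digAt x 0 j).filter (fun dg => dg ≠ 9)).map
            (fun dg => (9 - dg) * 10 ^ j.toNat)))) := by
        exact Multiset.bind_congr (fun j _ => (Multiset.coe_bind _ _).symm)
    _ = (↑a : Multiset Int).bind (fun x => (↑descJ : Multiset Int).bind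
          (fun j => ↑(((digAt x 0 j).filter (fun dg => dg ≠ 9)).map
            (fun dg => (9 - dg) * 10 ^ j.toNat)))) := Multiset.bind_bind _ _
    _ = (↑a : Multiset Int).bind (fun x => ↑(fAltGains x 0)) := by
        refine Multiset.bind_congr (fun x hx => ?_)
        rw [Multiset.coe_bind]
        have hb : x < 10 ^ (10 - (0:Int).toNat) := by
          simpa using hdom x (Multiset.mem_coe.mp hx)
        exact perX x 0 (le_refl 0) (by norm_num : (0:Int) ≤ 10) hb
    _ = ↑(a.flatMap (fun x => fAltGains x 0)) := Multiset.coe_bind _ _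

-- ===== VERDICT (by name: the statement is the Claim_ definition above) =====
theorem f_spec : Claim_equal_f := by
  intro k a hdom
  unfold Spec_f f f_alt
  simp only []
  have hcol := getD_dF a
  have hdom' : ∀ x ∈ a, x < 10 ^ 10 := by
    have h := hdom
    unfold Dom_f at h
    rw [Bool.and_eq_true] at h
    intro x hx
    have hx2 := List.all_eq_true.mp h.2 x hx
    simp [pvDomInt] at hx2
    omega
  set dF := a.foldl (fun d x => fFill x 0 d)
    ((PySem.List.pyRange 0 10 1).foldl (fun d i => d.insert i []) PySem.Dict.empty) with hdF
  rw [fOuter_eq, gTake_sum_take, zero_add]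
  rw [PySem.List.foldl_append_eq_flatMap, List.nil_append]
  rw [PySem.List.slice_to _ (by omega : (0:Int) ≤ max k 0)]
  have hperm : (laFrom dF 9).Perm
      (PySem.List.sorted (a.flatMap (fun x => fAltGains x 0)) (fun x => x) true) :=
    (la_perm_gains a dF hcol hdom').trans
      (PySem.List.sorted_perm (a.flatMap (fun x => fAltGains x 0)) (fun x => x) true).symm
  have hs1 : (laFrom dF 9).Pairwise (fun g g' => g' ≤ g) := laFrom_sorted a dF hcol
  have hs2 : (PySem.List.sorted (a.flatMap (fun x => fAltGains x 0)) (fun x => x) true).Pairwise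
      (fun g g' => g' ≤ g) := by
    simpa using PySem.List.sorted_pairwise_rev (a.flatMap (fun x => fAltGains x 0)) (fun x => x)
  haveI : Std.Antisymm (fun g g' : Int => g' ≤ g) := ⟨fun a b h1 h2 => le_antisymm h2 h1⟩
  rw [List.Perm.eq_of_pairwise' hs1 hs2 hperm]
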